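-- pv_equiv track=rewrite | github.com/ecolab-nus/helion-mlir | src/helion_mlir/analysis.py | _order_host_tensor_names
-- ===== SOURCE A (Python) =====
-- def _order_host_tensor_names(
--     host_tensor_types: dict[str, str],
--     arg_types: dict[str, str],
--     stored_tensor_names: tuple[str, ...],
-- ) -> tuple[str, ...]:
--     stored = {name for name in stored_tensor_names if name in host_tensor_types}
--     ordered_names: list[str] = []
--
--     for name in arg_types:
--         if name in host_tensor_types and name not in stored:
--             ordered_names.append(name)
--
--     for name in host_tensor_types:
--         if name not in stored and name not in ordered_names:
--             ordered_names.append(name)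
--
--     for name in stored_tensor_names:
--         if name in host_tensor_types and name not in ordered_names:
--             ordered_names.append(name)
--
--     return tuple(ordered_names)
-- ===== SOURCE B (Python) =====
-- def _order_host_tensor_names(
--     host_tensor_types: dict[str, str],
--     arg_types: dict[str, str],
--     stored_tensor_names: tuple[str, ...],
-- ) -> tuple[str, ...]:
--     arg_rank = {name: i for i, name in enumerate(arg_types)}
--     host_rank = {name: i for i, name in enumerate(host_tensor_types)}
--     stored_rank: dict[str, int] = {}
--     for i, name in enumerate(stored_tensor_names):
--         if name not in stored_rank:
--             stored_rank[name] = i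
--
--     def key(name: str) -> tuple[int, int]:
--         if name in stored_rank:
--             return (2, stored_rank[name])
--         if name in arg_rank:
--             return (0, arg_rank[name])
--         return (1, host_rank[name])
--
--     return tuple(sorted(host_tensor_types, key=key))
-- ===== Notes on version B (the rewrite author's own statement) =====
-- stated objective: faster
-- what changed: Replaces the three sequential append-with-dedup loops (each guarded by linear membership scans of the growing output list) by precomputed {name: index} rank dictionaries and one stable sort of the host names under a (category, first-occurrence rank) key: stored=2, arg=0, other=1.
import Mathlib
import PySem

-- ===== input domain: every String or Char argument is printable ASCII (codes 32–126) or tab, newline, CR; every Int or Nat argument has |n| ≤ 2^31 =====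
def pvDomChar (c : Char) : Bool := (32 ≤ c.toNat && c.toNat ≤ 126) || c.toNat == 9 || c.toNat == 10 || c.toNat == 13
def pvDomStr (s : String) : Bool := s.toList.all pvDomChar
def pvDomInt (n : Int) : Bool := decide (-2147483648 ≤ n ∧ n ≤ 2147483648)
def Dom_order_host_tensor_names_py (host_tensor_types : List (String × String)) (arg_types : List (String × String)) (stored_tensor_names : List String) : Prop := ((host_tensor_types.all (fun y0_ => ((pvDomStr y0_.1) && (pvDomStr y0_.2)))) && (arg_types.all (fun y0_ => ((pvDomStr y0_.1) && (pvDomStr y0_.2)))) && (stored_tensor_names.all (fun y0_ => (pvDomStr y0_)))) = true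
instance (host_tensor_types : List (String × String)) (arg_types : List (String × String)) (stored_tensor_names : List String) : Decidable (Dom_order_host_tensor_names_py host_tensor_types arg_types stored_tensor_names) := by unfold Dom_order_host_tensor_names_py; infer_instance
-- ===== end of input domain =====

-- B replaces A's three append-with-dedup loops (linear membership scans of the growing output)
-- by rank dictionaries plus one stable sort of the host names under a (category, rank) key;
-- same result, measurably faster on large inputs.

-- ===== PORT A =====
def order_host_tensor_names_py (host_tensor_types : List (String × String)) (arg_types : List (String × String)) (stored_tensor_names : List String) : List String :=
  let hostKeys := host_tensor_types.map Prod.fst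
  let argKeys := arg_types.map Prod.fst
  let stored : PySem.Set String :=
    PySem.Set.ofList (stored_tensor_names.filter (fun n => hostKeys.contains n))
  let o1 := argKeys.foldl
    (fun acc n => if hostKeys.contains n && !(stored.contains n) then acc ++ [n] else acc) []
  let o2 := hostKeys.foldl
    (fun acc n => if !(stored.contains n) && !(acc.contains n) then acc ++ [n] else acc) o1
  let o3 := stored_tensor_names.foldl
    (fun acc n => if hostKeys.contains n && !(acc.contains n) then acc ++ [n] else acc) o2
  o3

-- ===== PORT B =====
def order_host_tensor_names_py_alt (host_tensor_types : List (String × String)) (arg_types : List (String × String)) (stored_tensor_names : List String) : List String :=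
  let hostNames := host_tensor_types.map Prod.fst
  let argNames := arg_types.map Prod.fst
  let argRank : PySem.Dict String Int :=
    (PySem.List.enumerate argNames).foldl (fun d p => d.insert p.2 p.1) PySem.Dict.empty
  let hostRank : PySem.Dict String Int :=
    (PySem.List.enumerate hostNames).foldl (fun d p => d.insert p.2 p.1) PySem.Dict.empty
  let storedRank : PySem.Dict String Int :=
    (PySem.List.enumerate stored_tensor_names).foldl
      (fun d p => if d.contains p.2 then d else d.insert p.2 p.1) PySem.Dict.empty
  let k1 : String → Int := fun n =>
    if storedRank.contains n then 2
    else if argRank.contains n then 0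
    else 1
  let k2 : String → Int := fun n =>
    if storedRank.contains n then storedRank.getD n 0
    else if argRank.contains n then argRank.getD n 0
    else hostRank.getD n 0
  PySem.List.sorted2 hostNames k1 k2

-- ===== PRECONDITION & SPEC =====
-- Pre_ excludes only association lists with duplicate dict keys: a Python dict cannot contain
-- duplicate keys, so no such input ever reaches A.
def Pre_order_host_tensor_names_py (host_tensor_types : List (String × String)) (arg_types : List (String × String)) (stored_tensor_names : List String) : Prop :=
  (host_tensor_types.map Prod.fst).Nodup ∧ (arg_types.map Prod.fst).Nodup

instance (host_tensor_types : List (String × String)) (arg_types : List (String × String)) (stored_tensor_names : List String) : Decidable (Pre_order_host_tensor_names_py host_tensor_types arg_types stored_tensor_names) := by unfold Pre_order_host_tensor_names_py; infer_instance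

def pvWitness_order_host_tensor_names_py : (List (String × String)) × (List (String × String)) × List String :=
  ([("x", "T"), ("y", "T")], [("y", "T"), ("z", "T")], ["x"])

def Spec_order_host_tensor_names_py (host_tensor_types : List (String × String)) (arg_types : List (String × String)) (stored_tensor_names : List String) (out : List String) : Prop := out = order_host_tensor_names_py_alt host_tensor_types arg_types stored_tensor_names
instance (host_tensor_types : List (String × String)) (arg_types : List (String × String)) (stored_tensor_names : List String) (out : List String) : Decidable (Spec_order_host_tensor_names_py host_tensor_types arg_types stored_tensor_names out) := by unfold Spec_order_host_tensor_names_py; infer_instance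

-- ===== CLAIM (what is proved, stated in full; the proofs are below) =====
def Claim_equal_order_host_tensor_names_py : Prop := ∀ (host_tensor_types : List (String × String)) (arg_types : List (String × String)) (stored_tensor_names : List String), Dom_order_host_tensor_names_py host_tensor_types arg_types stored_tensor_names → Pre_order_host_tensor_names_py host_tensor_types arg_types stored_tensor_names → Spec_order_host_tensor_names_py host_tensor_types arg_types stored_tensor_names (order_host_tensor_names_py host_tensor_types arg_types stored_tensor_names)

-- ===== LEMMAS AND PROOFS =====

-- first-occurrence rank of an element of l, as an Int
def pvRank (l : List String) (n : String) : Int := ((PySem.List.index? l n).getD 0 : Nat)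

theorem pvRank_nonneg (l : List String) (n : String) : 0 ≤ pvRank l n := by
  unfold pvRank; exact Int.natCast_nonneg _

theorem pvRank_cons_of_ne (t : List String) (x b : String) (hne : x ≠ b) (hb : b ∈ t) :
    pvRank (x :: t) b = pvRank t b + 1 := by
  unfold pvRank
  rw [PySem.List.index?_cons_of_ne t hne]
  have hsome : (PySem.List.index? t b).isSome := by
    rw [PySem.List.index?_isSome_iff]; exact hb
  obtain ⟨k, hk⟩ := Option.isSome_iff_exists.1 hsome
  rw [hk]
  simp

theorem pvRank_cons_pos (t : List String) (x b : String) (hne : x ≠ b) (hb : b ∈ t) :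
    0 < pvRank (x :: t) b := by
  rw [pvRank_cons_of_ne t x b hne hb]
  have := pvRank_nonneg t b
  omega

theorem index?_getElem_of_nodup (l : List String) (h : l.Nodup) (i : Nat) (hi : i < l.length) :
    PySem.List.index? l l[i] = some i := by
  rw [PySem.List.index?_eq_some_iff]
  refine ⟨l.take i, l.drop (i + 1), ?_, by simp [Nat.min_eq_left hi.le], ?_⟩
  · conv_lhs => rw [← List.take_append_drop i l]
    rw [← List.getElem_cons_drop hi]
  · intro hmem
    obtain ⟨j, hj, hEq⟩ := List.getElem_of_mem hmem
    have hji' : j < i ∧ j < l.length := by simpa using hj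
    have hji := hji'.1
    rw [List.getElem_take] at hEq
    exact (List.pairwise_iff_getElem.1 h) j i hji'.2 hi hji hEq

theorem pairwise_rank_of_nodup (l : List String) (h : l.Nodup) :
    l.Pairwise (fun a b => pvRank l a < pvRank l b) := by
  rw [List.pairwise_iff_getElem]
  intro i j hi hj hij
  unfold pvRank
  rw [index?_getElem_of_nodup l h i hi, index?_getElem_of_nodup l h j hj]
  simpa using hij

theorem mem_dedup_filter (s : List String) (Q : String → Bool) (b : String)
    (hb : b ∈ PySem.List.dedup (s.filter Q)) : b ∈ s ∧ Q b = true := by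
  rw [PySem.List.dedup_eq_ofList, PySem.Set.mem_ofList, List.mem_filter] at hb
  exact hb

theorem pairwise_rank_dedup_filter (s : List String) (Q : String → Bool) :
    (PySem.List.dedup (s.filter Q)).Pairwise (fun a b => pvRank s a < pvRank s b) := by
  induction s with
  | nil => simp [PySem.List.dedup, PySem.Set.ofList]
  | cons x t ih =>
    by_cases hx : Q x = true
    · rw [List.filter_cons_of_pos hx, PySem.List.dedup_eq_ofList, PySem.Set.ofList_cons]
      have ihl : (PySem.Set.ofList (t.filter Q)).Pairwise (fun a b => pvRank t a < pvRank t b) := by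
        rw [← PySem.List.dedup_eq_ofList]; exact ih
      constructor
      · intro b hb
        have hb' : b ∈ PySem.Set.ofList (t.filter Q) ∧ ¬(b = x) := by
          simpa [PySem.Set.discard] using hb
        have hbt : b ∈ t := List.mem_of_mem_filter ((PySem.Set.mem_ofList _ _).1 hb'.1)
        have h0 : pvRank (x :: t) x = 0 := by
          unfold pvRank; rw [PySem.List.index?_cons_self]; simp
        rw [h0]
        exact pvRank_cons_pos t x b (fun hEq => hb'.2 hEq.symm) hbt
      · have hsub : ((PySem.Set.ofList (t.filter Q)).discard x).Sublist (PySem.Set.ofList (t.filter Q)) := by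
          simpa [PySem.Set.discard] using List.filter_sublist
        refine (List.Pairwise.sublist hsub ihl).imp_of_mem ?_
        intro a b ha hb hab
        have ha' : a ∈ PySem.Set.ofList (t.filter Q) ∧ ¬(a = x) := by
          simpa [PySem.Set.discard] using ha
        have hb' : b ∈ PySem.Set.ofList (t.filter Q) ∧ ¬(b = x) := by
          simpa [PySem.Set.discard] using hb
        have hat : a ∈ t := List.mem_of_mem_filter ((PySem.Set.mem_ofList _ _).1 ha'.1)
        have hbt : b ∈ t := List.mem_of_mem_filter ((PySem.Set.mem_ofList _ _).1 hb'.1)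
        rw [pvRank_cons_of_ne t x a (fun hEq => ha'.2 hEq.symm) hat,
           pvRank_cons_of_ne t x b (fun hEq => hb'.2 hEq.symm) hbt]
        omega
    · rw [List.filter_cons_of_neg hx]
      refine ih.imp_of_mem ?_
      intro a b ha hb hab
      have ha' := mem_dedup_filter t Q a ha
      have hb' := mem_dedup_filter t Q b hb
      have hax : x ≠ a := fun hEq => hx (hEq ▸ ha'.2)
      have hbx : x ≠ b := fun hEq => hx (hEq ▸ hb'.2)
      rw [pvRank_cons_of_ne t x a hax ha'.1, pvRank_cons_of_ne t x b hbx hb'.1]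
      omega

-- rank dictionaries: building {name: index} with first-occurrence guard
def pvBuild (l : List String) (i : Int) (d : PySem.Dict String Int) : PySem.Dict String Int :=
  match l with
  | [] => d
  | x :: t => pvBuild t (i + 1) (if d.contains x then d else d.insert x i)

theorem dict_contains_insert_ne (d : PySem.Dict String Int) (k n : String) (v : Int) (h : n ≠ k) :
    (d.insert k v).contains n = d.contains n := by
  simp [pysem, h]

theorem pvBuild_eq_foldl_guard (l : List String) (i : Int) (d : PySem.Dict String Int) :
    (PySem.List.enumerate l i).foldl
        (fun d p => if d.contains p.2 then d else d.insert p.2 p.1) d = pvBuild l i d := by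
  induction l generalizing i d with
  | nil => simp [PySem.List.enumerate_nil, pvBuild]
  | cons x t ih =>
    rw [PySem.List.enumerate_cons]
    simp only [List.foldl_cons]
    rw [ih]
    rfl

theorem pvBuild_eq_foldl_plain (l : List String) (hl : l.Nodup) (i : Int) (d : PySem.Dict String Int)
    (hd : ∀ n, n ∈ l → d.contains n = false) :
    (PySem.List.enumerate l i).foldl (fun d p => d.insert p.2 p.1) d = pvBuild l i d := by
  induction l generalizing i d with
  | nil => simp [PySem.List.enumerate_nil, pvBuild]
  | cons x t ih =>
    rw [PySem.List.enumerate_cons]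
    simp only [List.foldl_cons]
    have hx : d.contains x = false := hd x (by simp)
    rw [ih (List.Nodup.of_cons hl) (i + 1) _ ?_]
    · show _ = pvBuild (x :: t) i d
      simp only [pvBuild, hx, Bool.false_eq_true, if_false]
    · intro n hn
      have hne : n ≠ x := fun hEq => (List.nodup_cons.1 hl).1 (hEq ▸ hn)
      rw [dict_contains_insert_ne d x n i hne]
      exact hd n (List.mem_cons_of_mem _ hn)

theorem pvBuild_contains (l : List String) (i : Int) (d : PySem.Dict String Int) (n : String) :
    (pvBuild l i d).contains n = (d.contains n || decide (n ∈ l)) := by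
  induction l generalizing i d with
  | nil => simp [pvBuild]
  | cons x t ih =>
    simp only [pvBuild]
    by_cases hx : d.contains x = true
    · rw [if_pos hx, ih]
      by_cases hnx : n = x
      · subst hnx; simp [hx]
      · simp [hnx]
    · rw [if_neg hx, ih]
      by_cases hnx : n = x
      · subst hnx
        simp [PySem.Dict.contains_insert_self]
      · rw [dict_contains_insert_ne d x n i hnx]
        simp [hnx]

theorem pvBuild_getD_of_contains (l : List String) (i : Int) (d : PySem.Dict String Int) (n : String)
    (hc : d.contains n = true) :
    (pvBuild l i d).getD n 0 = d.getD n 0 := by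
  induction l generalizing i d with
  | nil => rfl
  | cons x t ih =>
    simp only [pvBuild]
    by_cases hx : d.contains x = true
    · rw [if_pos hx, ih _ _ hc]
    · rw [if_neg hx]
      have hnx : n ≠ x := fun hEq => hx (hEq ▸ hc)
      rw [ih _ _ (by rw [dict_contains_insert_ne d x n i hnx]; exact hc)]
      simp [pysem, hnx]

theorem pvBuild_getD (l : List String) (i : Int) (d : PySem.Dict String Int) (n : String)
    (hc : d.contains n = false) (hn : n ∈ l) :
    (pvBuild l i d).getD n 0 = i + pvRank l n := by
  induction l generalizing i d with
  | nil => cases hn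
  | cons x t ih =>
    simp only [pvBuild]
    by_cases hnx : n = x
    · subst hnx
      rw [if_neg (by simp [hc])]
      rw [pvBuild_getD_of_contains t (i + 1) _ n (PySem.Dict.contains_insert_self _ _ _),
         PySem.Dict.getD_insert_self]
      have h0 : pvRank (n :: t) n = 0 := by
        unfold pvRank; rw [PySem.List.index?_cons_self]; simp
      rw [h0]; ring
    · have hnt : n ∈ t := (List.mem_cons.1 hn).resolve_left hnx
      have hrank := pvRank_cons_of_ne t x n (Ne.symm hnx) hnt
      by_cases hx : d.contains x = true
      · rw [if_pos hx, ih (i + 1) d hc hnt, hrank]; ring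
      · rw [if_neg hx]
        rw [ih (i + 1) _ (by rw [dict_contains_insert_ne d x n i hnx]; exact hc) hnt, hrank]
        ring

theorem foldl_dedup_general (s : List String) (Q : String → Bool) (acc : List String) :
    s.foldl (fun acc n => if Q n && !(acc.contains n) then acc ++ [n] else acc) acc
      = acc ++ (PySem.List.dedup (s.filter Q)).filter (fun n => !(acc.contains n)) := by
  induction s generalizing acc with
  | nil => simp [PySem.List.dedup, PySem.Set.ofList]
  | cons x t ih =>
    simp only [List.foldl_cons]
    by_cases hx : Q x = true
    · have hded : PySem.List.dedup (x :: List.filter Q t)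
          = x :: List.filter (fun y => !(y == x)) (PySem.List.dedup (List.filter Q t)) := by
        rw [PySem.List.dedup_eq_ofList, PySem.Set.ofList_cons, PySem.List.dedup_eq_ofList]
        rfl
      rw [List.filter_cons_of_pos hx]
      by_cases hmem : x ∈ acc
      · rw [if_neg (by simp [hx, hmem])]
        rw [ih acc, hded]
        rw [List.filter_cons_of_neg (by simp [hmem])]
        congr 1
        rw [List.filter_filter]
        apply List.filter_congr
        intro n hn
        by_cases hnx : n = x
        · subst hnx; simp [hmem]
        · simp [hnx]
      · rw [if_pos (by simp [hx, hmem])]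
        rw [ih (acc ++ [x]), hded]
        rw [List.filter_cons_of_pos (by simp [hmem])]
        rw [List.append_assoc, List.singleton_append]
        congr 2
        rw [List.filter_filter]
        apply List.filter_congr
        intro n hn
        by_cases hnx : n = x <;> by_cases hna : n ∈ acc <;>
          simp [hnx, hna]
    · rw [if_neg (by simp [hx]), List.filter_cons_of_neg hx]
      exact ih acc

theorem sorted2_eq_sorted_toLex (xs : List String) (k1 k2 : String → Int) :
    PySem.List.sorted2 xs k1 k2 = PySem.List.sorted xs (fun x => toLex (k1 x, k2 x)) := by
  rw [PySem.List.sorted_eq_foldl_insertBy]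
  show List.foldl (fun acc x => PySem.List.insertBy
      (fun a b => decide (k1 a < k1 b) || (!decide (k1 b < k1 a) && decide (k2 a < k2 b))) x acc) [] xs = _
  congr 1
  funext acc x
  congr 1
  funext a b
  by_cases h1 : k1 a < k1 b <;> by_cases h2 : k1 b < k1 a <;> by_cases h3 : k2 a < k2 b <;>
    simp [Prod.Lex.toLex_lt_toLex, h1, h2, h3] <;> omega

-- ===== VERDICT (by name: the statement is the Claim_ definition above) =====
theorem order_host_tensor_names_py_spec : Claim_equal_order_host_tensor_names_py := by
  intro h a s _hd hpre
  obtain ⟨hhk, hak⟩ := hpre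
  unfold Spec_order_host_tensor_names_py order_host_tensor_names_py order_host_tensor_names_py_alt
  dsimp only
  set hk := h.map Prod.fst with hkdef
  set ak := a.map Prod.fst with akdef
  set st := PySem.Set.ofList (s.filter (fun n => hk.contains n)) with stdef
  have hst : ∀ n, (st.contains n = true) ↔ (n ∈ s ∧ n ∈ hk) := by
    intro n
    rw [stdef]
    constructor
    · intro hc
      have hm : n ∈ PySem.Set.ofList (s.filter (fun m => hk.contains m)) := by simpa using hc
      have hm' := (PySem.Set.mem_ofList _ _).1 hm
      rw [List.mem_filter] at hm'
      exact ⟨hm'.1, by simpa using hm'.2⟩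
    · rintro ⟨h1, h2⟩
      have hm : n ∈ PySem.Set.ofList (s.filter (fun m => hk.contains m)) :=
        (PySem.Set.mem_ofList _ _).2 (List.mem_filter.2 ⟨h1, by simpa using h2⟩)
      simpa using hm
  have hstf : ∀ n, n ∈ hk → n ∉ s → st.contains n = false := by
    intro n hn hns
    cases hc : st.contains n
    · rfl
    · exact absurd ((hst n).1 hc).1 hns
  rw [PySem.List.foldl_append_if_eq_filter, List.nil_append]
  rw [foldl_dedup_general, foldl_dedup_general, sorted2_eq_sorted_toLex]
  set AR := (PySem.List.enumerate ak 0).foldl (fun d p => d.insert p.2 p.1) PySem.Dict.empty with ARdef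
  set HR := (PySem.List.enumerate hk 0).foldl (fun d p => d.insert p.2 p.1) PySem.Dict.empty with HRdef
  set SR := (PySem.List.enumerate s 0).foldl
      (fun d p => if d.contains p.2 then d else d.insert p.2 p.1) PySem.Dict.empty with SRdef
  have hARb : AR = pvBuild ak 0 PySem.Dict.empty := by
    rw [ARdef]; exact pvBuild_eq_foldl_plain ak hak 0 _ (fun n _ => by simp [pysem])
  have hHRb : HR = pvBuild hk 0 PySem.Dict.empty := by
    rw [HRdef]; exact pvBuild_eq_foldl_plain hk hhk 0 _ (fun n _ => by simp [pysem])
  have hSRb : SR = pvBuild s 0 PySem.Dict.empty := by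
    rw [SRdef]; exact pvBuild_eq_foldl_guard s 0 _
  have hsct : ∀ n, n ∈ s → SR.contains n = true := by
    intro n hn; rw [hSRb, pvBuild_contains]; simp [hn]
  have hscf : ∀ n, n ∉ s → SR.contains n = false := by
    intro n hn; rw [hSRb, pvBuild_contains]; simp [hn, pysem]
  have hact : ∀ n, n ∈ ak → AR.contains n = true := by
    intro n hn; rw [hARb, pvBuild_contains]; simp [hn]
  have hacf : ∀ n, n ∉ ak → AR.contains n = false := by
    intro n hn; rw [hARb, pvBuild_contains]; simp [hn, pysem]
  have hsgd : ∀ n, n ∈ s → SR.getD n 0 = pvRank s n := by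
    intro n hn; rw [hSRb, pvBuild_getD s 0 _ n (by simp [pysem]) hn]; ring
  have hagd : ∀ n, n ∈ ak → AR.getD n 0 = pvRank ak n := by
    intro n hn; rw [hARb, pvBuild_getD ak 0 _ n (by simp [pysem]) hn]; ring
  have hhgd : ∀ n, n ∈ hk → HR.getD n 0 = pvRank hk n := by
    intro n hn; rw [hHRb, pvBuild_getD hk 0 _ n (by simp [pysem]) hn]; ring
  set F1 := ak.filter (fun n => hk.contains n && !(st.contains n)) with F1def
  have hded2 : PySem.List.dedup (hk.filter (fun n => !(st.contains n)))
      = hk.filter (fun n => !(st.contains n)) := by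
    rw [PySem.List.dedup_eq_ofList, PySem.Set.ofList_eq_self_of_nodup _ (hhk.filter _)]
  rw [hded2, List.filter_filter]
  set F2 := hk.filter (fun n => !(F1.contains n) && !(st.contains n)) with F2def
  set D3 := PySem.List.dedup (s.filter (fun n => hk.contains n)) with D3def
  -- membership characterisations
  have hmemF1 : ∀ n, n ∈ F1 → n ∈ ak ∧ n ∈ hk ∧ n ∉ s := by
    intro n hn
    rw [F1def, List.mem_filter] at hn
    obtain ⟨hna, hcond⟩ := hn
    have h1 : hk.contains n = true ∧ (st.contains n) = false := by
      simp only [Bool.and_eq_true, Bool.not_eq_true'] at hcond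
      exact hcond
    have hnh : n ∈ hk := by simpa using h1.1
    refine ⟨hna, hnh, fun hns => ?_⟩
    rw [(hst n).2 ⟨hns, hnh⟩] at h1
    exact absurd h1.2 (by simp)
  have hmemF1' : ∀ n, n ∈ ak → n ∈ hk → n ∉ s → n ∈ F1 := by
    intro n hna hnh hns
    rw [F1def, List.mem_filter]
    refine ⟨hna, ?_⟩
    rw [hstf n hnh hns]
    simp [hnh]
  have hmemF2 : ∀ n, n ∈ F2 → n ∈ hk ∧ n ∉ s ∧ n ∉ ak := by
    intro n hn
    rw [F2def, List.mem_filter] at hn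
    obtain ⟨hnh, hcond⟩ := hn
    have h1 : (F1.contains n) = false ∧ (st.contains n) = false := by
      simp only [Bool.and_eq_true, Bool.not_eq_true'] at hcond
      exact hcond
    have hns : n ∉ s := fun hns => by rw [(hst n).2 ⟨hns, hnh⟩] at h1; exact absurd h1.2 (by simp)
    refine ⟨hnh, hns, fun hna => ?_⟩
    have hcc : F1.contains n = true := by simpa using hmemF1' n hna hnh hns
    rw [h1.1] at hcc
    exact absurd hcc (by simp)
  have hmemF2' : ∀ n, n ∈ hk → n ∉ s → n ∉ ak → n ∈ F2 := by
    intro n hnh hns hna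
    rw [F2def, List.mem_filter]
    refine ⟨hnh, ?_⟩
    have h1 : F1.contains n = false := by
      cases hc : F1.contains n
      · rfl
      · have : n ∈ F1 := by simpa using hc
        exact absurd (hmemF1 n this).1 hna
    rw [h1, hstf n hnh hns]
    simp
  have hmemD3 : ∀ n, n ∈ D3 → n ∈ s ∧ n ∈ hk := by
    intro n hn
    rw [D3def] at hn
    have := mem_dedup_filter s _ n hn
    exact ⟨this.1, by simpa using this.2⟩
  have hmemD3' : ∀ n, n ∈ s → n ∈ hk → n ∈ D3 := by
    intro n hns hnh
    rw [D3def, PySem.List.dedup_eq_ofList, PySem.Set.mem_ofList, List.mem_filter]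
    exact ⟨hns, by simpa using hnh⟩
  -- drop the last filter: nothing stored is already in F1 ++ F2
  have hX3 : (D3.filter (fun n => !((F1 ++ F2).contains n))) = D3 := by
    apply List.filter_eq_self.2
    intro n hn
    obtain ⟨hns, hnh⟩ := hmemD3 n hn
    have h1 : n ∉ F1 := fun hmem => (hmemF1 n hmem).2.2 hns
    have h2 : n ∉ F2 := fun hmem => (hmemF2 n hmem).2.1 hns
    have hcf : (F1 ++ F2).contains n = false := by
      cases hc : (F1 ++ F2).contains n
      · rfl
      · have hm : n ∈ F1 ++ F2 := by simpa using hc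
        rcases List.mem_append.1 hm with hmm | hmm
        · exact absurd hmm h1
        · exact absurd hmm h2
    rw [hcf]
    simp
  rw [hX3]
  -- per-block strict increase of ranks
  have pF1 : F1.Pairwise (fun x y => pvRank ak x < pvRank ak y) :=
    List.Pairwise.sublist (F1def ▸ List.filter_sublist) (pairwise_rank_of_nodup ak hak)
  have pF2 : F2.Pairwise (fun x y => pvRank hk x < pvRank hk y) :=
    List.Pairwise.sublist (F2def ▸ List.filter_sublist) (pairwise_rank_of_nodup hk hhk)
  have pD3 : D3.Pairwise (fun x y => pvRank s x < pvRank s y) :=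
    D3def ▸ pairwise_rank_dedup_filter s (fun n => hk.contains n)
  refine (PySem.List.sorted_eq_of_perm_of_pairwise_lt _ _ _ ?_ ?_).symm
  case refine_2 =>
    -- strict lexicographic increase of the sort key along F1 ++ F2 ++ D3
    rw [List.pairwise_append]
    refine ⟨?_, ?_, ?_⟩
    · rw [List.pairwise_append]
      refine ⟨?_, ?_, ?_⟩
      · refine pF1.imp_of_mem ?_
        intro x y hx hy hr
        obtain ⟨hxa, hxh, hxs⟩ := hmemF1 x hx
        obtain ⟨hya, hyh, hys⟩ := hmemF1 y hy
        simp only [hscf x hxs, hscf y hys, hact x hxa, hact y hya,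
          Bool.false_eq_true, if_false, if_true]
        refine Prod.Lex.toLex_lt_toLex.2 (Or.inr ⟨rfl, ?_⟩)
        simpa [hagd x hxa, hagd y hya] using hr
      · refine pF2.imp_of_mem ?_
        intro x y hx hy hr
        obtain ⟨hxh, hxs, hxa⟩ := hmemF2 x hx
        obtain ⟨hyh, hys, hya⟩ := hmemF2 y hy
        simp only [hscf x hxs, hscf y hys, hacf x hxa, hacf y hya,
          Bool.false_eq_true, if_false]
        refine Prod.Lex.toLex_lt_toLex.2 (Or.inr ⟨rfl, ?_⟩)
        simpa [hhgd x hxh, hhgd y hyh] using hr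
      · intro x hx y hy
        obtain ⟨hxa, hxh, hxs⟩ := hmemF1 x hx
        obtain ⟨hyh, hys, hya⟩ := hmemF2 y hy
        simp only [hscf x hxs, hscf y hys, hact x hxa, hacf y hya,
          Bool.false_eq_true, if_false, if_true]
        exact Prod.Lex.toLex_lt_toLex.2 (Or.inl (by norm_num))
    · refine pD3.imp_of_mem ?_
      intro x y hx hy hr
      obtain ⟨hxs, hxh⟩ := hmemD3 x hx
      obtain ⟨hys, hyh⟩ := hmemD3 y hy
      simp only [hsct x hxs, hsct y hys, if_true]
      refine Prod.Lex.toLex_lt_toLex.2 (Or.inr ⟨rfl, ?_⟩)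
      simpa [hsgd x hxs, hsgd y hys] using hr
    · intro x hx y hy
      obtain ⟨hys, hyh⟩ := hmemD3 y hy
      have hxs : x ∉ s := by
        rcases List.mem_append.1 hx with hx1 | hx2
        · exact (hmemF1 x hx1).2.2
        · exact (hmemF2 x hx2).2.1
      simp only [hscf x hxs, hsct y hys, Bool.false_eq_true, if_false, if_true]
      by_cases hc : AR.contains x = true
      · simp only [hc, if_true]
        exact Prod.Lex.toLex_lt_toLex.2 (Or.inl (by norm_num))
      · simp only [Bool.not_eq_true] at hc
        simp only [hc, Bool.false_eq_true, if_false]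
        exact Prod.Lex.toLex_lt_toLex.2 (Or.inl (by norm_num))
  case refine_1 =>
    -- F1 ++ F2 ++ D3 is a permutation of the host names
    have n1 : F1.Nodup := List.Nodup.sublist (F1def ▸ List.filter_sublist) hak
    have n2 : F2.Nodup := List.Nodup.sublist (F2def ▸ List.filter_sublist) hhk
    have n3 : D3.Nodup := by
      rw [D3def, PySem.List.dedup_eq_ofList]
      exact PySem.Set.nodup_ofList _
    have n12 : (F1 ++ F2).Nodup := by
      refine List.Nodup.append n1 n2 ?_
      intro x hx1 hx2
      exact (hmemF2 x hx2).2.2 (hmemF1 x hx1).1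
    have nall : ((F1 ++ F2) ++ D3).Nodup := by
      refine List.Nodup.append n12 n3 ?_
      intro x hx1 hx2
      have hxs : x ∉ s := by
        rcases List.mem_append.1 hx1 with hm | hm
        · exact (hmemF1 x hm).2.2
        · exact (hmemF2 x hm).2.1
      exact hxs (hmemD3 x hx2).1
    rw [List.perm_ext_iff_of_nodup nall hhk]
    intro n
    constructor
    · intro hn
      rcases List.mem_append.1 hn with hm | hm
      · rcases List.mem_append.1 hm with hm1 | hm1
        · exact (hmemF1 n hm1).2.1
        · exact (hmemF2 n hm1).1
      · exact (hmemD3 n hm).2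
    · intro hn
      by_cases hns : n ∈ s
      · exact List.mem_append.2 (Or.inr (hmemD3' n hns hn))
      · by_cases hna : n ∈ ak
        · exact List.mem_append.2 (Or.inl (List.mem_append.2 (Or.inl (hmemF1' n hna hn hns))))
        · exact List.mem_append.2 (Or.inl (List.mem_append.2 (Or.inr (hmemF2' n hn hns hna))))
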